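-- pv_equiv track=rewrite | github.com/Naveenk654/Reference-Scanner | backend/main.py | classify_reference_by_urls
-- ===== SOURCE A (Python) =====
-- from typing import List, Optional, Dict
--
-- def classify_reference_by_urls(urls: List[str]) -> str:
--     """Classify reference type purely from URL domains."""
--     if not urls:
--         return "Unknown"
--
--     research_domains = [
--         "doi.org",
--         "arxiv.org",
--         "ieee.org",
--         "acm.org",
--         "springer.com",
--         "nature.com",
--         "wiley.com",
--         "sciencedirect.com",
--         "pubmed.ncbi.nlm.nih.gov",
--     ]
--     news_domains = [
--         "bbc.com",
--         "bbc.co.uk",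
--         "cnn.com",
--         "nytimes.com",
--         "theguardian.com",
--         "reuters.com",
--         "timesofindia.indiatimes.com",
--         "indianexpress.com",
--         "thehindu.com",
--     ]
--
--     for url in urls:
--         url_lower = url.lower()
--         if any(domain in url_lower for domain in research_domains):
--             return "Research Paper"
--         if any(domain in url_lower for domain in news_domains):
--             return "News Article"
--         if "youtube.com" in url_lower or "youtu.be" in url_lower:
--             return "YouTube Video"
--
--     return "General Web Reference"
-- ===== SOURCE B (Python) =====
-- RESEARCH = [
--     "doi.org", "arxiv.org", "ieee.org", "acm.org", "springer.com",
--     "nature.com", "wiley.com", "sciencedirect.com", "pubmed.ncbi.nlm.nih.gov",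
-- ]
-- NEWS = [
--     "bbc.com", "bbc.co.uk", "cnn.com", "nytimes.com", "theguardian.com",
--     "reuters.com", "timesofindia.indiatimes.com", "indianexpress.com", "thehindu.com",
-- ]
-- YOUTUBE = ["youtube.com", "youtu.be"]
--
--
-- def _first_match_index(lows, domains):
--     """Index of the first string containing any of the domains; len(lows) if none."""
--     for i, u in enumerate(lows):
--         if any(d in u for d in domains):
--             return i
--     return len(lows)
--
--
-- def classify_reference_by_urls(urls):
--     """Classify reference type purely from URL domains.
--
--     Staged passes: compute the first matching index per category, then pick the
--     category with the smallest index (research > news > youtube on ties, i.e.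
--     within the same URL)."""
--     if not urls:
--         return "Unknown"
--     lows = [u.lower() for u in urls]
--     ir = _first_match_index(lows, RESEARCH)
--     inw = _first_match_index(lows, NEWS)
--     iy = _first_match_index(lows, YOUTUBE)
--     best = min(ir, inw, iy)
--     if best == len(lows):
--         return "General Web Reference"
--     if ir == best:
--         return "Research Paper"
--     if inw == best:
--         return "News Article"
--     return "YouTube Video"
-- ===== Notes on version B (the rewrite author's own statement) =====
-- stated objective: alternative
-- what changed: Replaces A's single pass with a per-URL three-branch chain by three staged passes that each compute the first index of a URL matching one category, then pick the category with the smallest index (ties broken research > news > youtube).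
import Mathlib
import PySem

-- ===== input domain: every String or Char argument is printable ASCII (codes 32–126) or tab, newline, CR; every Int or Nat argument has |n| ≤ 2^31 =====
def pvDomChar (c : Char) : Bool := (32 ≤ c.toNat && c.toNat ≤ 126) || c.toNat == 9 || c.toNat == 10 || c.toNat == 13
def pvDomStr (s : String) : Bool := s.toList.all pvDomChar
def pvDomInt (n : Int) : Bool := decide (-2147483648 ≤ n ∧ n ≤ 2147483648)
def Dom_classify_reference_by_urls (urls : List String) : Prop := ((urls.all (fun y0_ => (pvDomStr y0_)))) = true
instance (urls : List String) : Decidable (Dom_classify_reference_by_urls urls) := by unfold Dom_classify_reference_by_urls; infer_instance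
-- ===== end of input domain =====

-- B replaces A's single pass with a per-URL branch chain by three staged per-category
-- first-match-index passes combined by a min/priority comparison (alternative decomposition).


-- ===== PORT A =====
def researchDomains : List String :=
  ["doi.org", "arxiv.org", "ieee.org", "acm.org", "springer.com",
   "nature.com", "wiley.com", "sciencedirect.com", "pubmed.ncbi.nlm.nih.gov"]

def newsDomains : List String :=
  ["bbc.com", "bbc.co.uk", "cnn.com", "nytimes.com", "theguardian.com",
   "reuters.com", "timesofindia.indiatimes.com", "indianexpress.com", "thehindu.com"]

def classifyLoopA (urls : List String) : String :=
  match urls with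
  | [] => "General Web Reference"
  | url :: rest =>
    let url_lower := PySem.Str.lower url
    if researchDomains.any (fun d => PySem.Str.isIn d url_lower) then "Research Paper"
    else if newsDomains.any (fun d => PySem.Str.isIn d url_lower) then "News Article"
    else if PySem.Str.isIn "youtube.com" url_lower || PySem.Str.isIn "youtu.be" url_lower then "YouTube Video"
    else classifyLoopA rest

def classify_reference_by_urls (urls : List String) : String :=
  if urls = [] then "Unknown" else classifyLoopA urls

-- ===== PORT B =====
def researchDomainsB : List String :=
  ["doi.org", "arxiv.org", "ieee.org", "acm.org", "springer.com",
   "nature.com", "wiley.com", "sciencedirect.com", "pubmed.ncbi.nlm.nih.gov"]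

def newsDomainsB : List String :=
  ["bbc.com", "bbc.co.uk", "cnn.com", "nytimes.com", "theguardian.com",
   "reuters.com", "timesofindia.indiatimes.com", "indianexpress.com", "thehindu.com"]

def youtubeDomainsB : List String := ["youtube.com", "youtu.be"]

-- index of the first string containing any of the domains; lows.length if none
def firstMatchIndex (lows : List String) (domains : List String) : Nat :=
  match lows with
  | [] => 0
  | u :: rest =>
    if domains.any (fun d => PySem.Str.isIn d u) then 0
    else 1 + firstMatchIndex rest domains

def classifyB (lows : List String) : String :=
  let ir := firstMatchIndex lows researchDomainsB
  let inw := firstMatchIndex lows newsDomainsB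
  let iy := firstMatchIndex lows youtubeDomainsB
  let best := min (min ir inw) iy
  if best = lows.length then "General Web Reference"
  else if ir = best then "Research Paper"
  else if inw = best then "News Article"
  else "YouTube Video"

def classify_reference_by_urls_alt (urls : List String) : String :=
  if urls = [] then "Unknown"
  else classifyB (urls.map PySem.Str.lower)

-- ===== PRECONDITION & SPEC =====
def Spec_classify_reference_by_urls (urls : List String) (out : String) : Prop := out = classify_reference_by_urls_alt urls
instance (urls : List String) (out : String) : Decidable (Spec_classify_reference_by_urls urls out) := by unfold Spec_classify_reference_by_urls; infer_instance

-- ===== CLAIM (what is proved, stated in full; the proofs are below) =====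
def Claim_equal_classify_reference_by_urls : Prop := ∀ (urls : List String), Dom_classify_reference_by_urls urls → Spec_classify_reference_by_urls urls (classify_reference_by_urls urls)

-- ===== LEMMAS AND PROOFS =====

theorem classifyB_cons (u : String) (lr : List String) :
    classifyB (u :: lr) =
      (if researchDomainsB.any (fun d => PySem.Str.isIn d u) then "Research Paper"
       else if newsDomainsB.any (fun d => PySem.Str.isIn d u) then "News Article"
       else if youtubeDomainsB.any (fun d => PySem.Str.isIn d u) then "YouTube Video"
       else classifyB lr) := by
  by_cases h1 : researchDomainsB.any (fun d => PySem.Str.isIn d u) = true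
  · rw [if_pos h1, classifyB]
    simp only [firstMatchIndex, if_pos h1]
    rw [if_neg (by simp only [List.length_cons]; omega), if_pos (by omega)]
  · rw [if_neg h1]
    by_cases h2 : newsDomainsB.any (fun d => PySem.Str.isIn d u) = true
    · rw [if_pos h2, classifyB]
      simp only [firstMatchIndex, if_neg h1, if_pos h2]
      rw [if_neg (by simp only [List.length_cons]; omega), if_neg (by omega), if_pos (by omega)]
    · rw [if_neg h2]
      by_cases h3 : youtubeDomainsB.any (fun d => PySem.Str.isIn d u) = true
      · rw [if_pos h3, classifyB]
        simp only [firstMatchIndex, if_neg h1, if_neg h2, if_pos h3]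
        rw [if_neg (by simp only [List.length_cons]; omega), if_neg (by omega), if_neg (by omega)]
      · rw [if_neg h3, classifyB, classifyB]
        simp only [firstMatchIndex, if_neg h1, if_neg h2, if_neg h3, List.length_cons]
        have hmin : ∀ a b c : Nat,
            min (min (1 + a) (1 + b)) (1 + c) = 1 + min (min a b) c := by omega
        rw [hmin]
        split_ifs <;> first | rfl | omega

theorem loop_eq (urls : List String) :
    classifyLoopA urls = classifyB (urls.map PySem.Str.lower) := by
  induction urls with
  | nil => rfl
  | cons url rest ih =>
    rw [classifyLoopA, List.map_cons, classifyB_cons]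
    have hy : youtubeDomainsB.any (fun d => PySem.Str.isIn d (PySem.Str.lower url))
        = (PySem.Str.isIn "youtube.com" (PySem.Str.lower url)
           || PySem.Str.isIn "youtu.be" (PySem.Str.lower url)) := by
      simp [youtubeDomainsB]
    rw [show researchDomainsB = researchDomains from rfl,
        show newsDomainsB = newsDomains from rfl, hy, ih]

theorem classify_reference_by_urls_spec : Claim_equal_classify_reference_by_urls := by
  intro urls _
  unfold Spec_classify_reference_by_urls classify_reference_by_urls classify_reference_by_urls_alt
  split_ifs with h
  · rfl
  · exact loop_eq urls
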